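-- pv_equiv track=rewrite | github.com/Synthefy/synthefy-migas | scripts/mc_fetch_top14.py | title_looks_relevant
-- ===== SOURCE A (Python) =====
-- TITLE_RELEVANCE_KEYWORDS = (
--     "futures", "price", "prices", "commodity", "commodities",
--     "rally", "falls", "surges", "barrel", "ounce", "bushel",
--     "NYMEX", "COMEX", "ICE", "CBOT", "LME", "WTI", "Brent",
--     "crude", "oil", "gas", "gold", "silver", "copper", "wheat",
--     "corn", "soy", "sugar", "coffee", "cocoa", "natural gas",
--     "Henry Hub", "TTF", "RBOB", "gasoline", "heating oil",
-- )
--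
-- def title_looks_relevant(title: str, stem: str, name: str) -> bool:
--     """True if title contains at least one relevance keyword or the commodity name."""
--     if not title:
--         return False
--     lower = title.lower()
--     # Check curated keywords
--     for kw in TITLE_RELEVANCE_KEYWORDS:
--         if kw.lower() in lower:
--             return True
--     # Check commodity name (e.g. "Cocoa", "Natural Gas")
--     name_words = name.lower().split()
--     for w in name_words:
--         if len(w) >= 3 and w in lower:
--             return True
--     return False
-- ===== SOURCE B (Python) =====
-- TITLE_RELEVANCE_KEYWORDS = (
--     "futures", "price", "prices", "commodity", "commodities",
--     "rally", "falls", "surges", "barrel", "ounce", "bushel",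
--     "NYMEX", "COMEX", "ICE", "CBOT", "LME", "WTI", "Brent",
--     "crude", "oil", "gas", "gold", "silver", "copper", "wheat",
--     "corn", "soy", "sugar", "coffee", "cocoa", "natural gas",
--     "Henry Hub", "TTF", "RBOB", "gasoline", "heating oil",
-- )
--
-- def title_looks_relevant(title: str, stem: str, name: str) -> bool:
--     """Single left-to-right pass over the title: at each position, test whether
--     any search term (lowered keyword or name word of len >= 3) starts there."""
--     if not title:
--         return False
--     lower = title.lower()
--     terms = [kw.lower() for kw in TITLE_RELEVANCE_KEYWORDS]
--     terms += [w for w in name.lower().split() if len(w) >= 3]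
--     return any(
--         lower.startswith(t, j) for j in range(len(lower)) for t in terms
--     )
-- ===== Notes on version B (the rewrite author's own statement) =====
-- stated objective: alternative
-- what changed: Replaces the two term-by-term substring scans (keywords, then name words) by building one combined term list and making a single left-to-right pass over the lowered title, testing at each position whether any term starts there.
import Mathlib
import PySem

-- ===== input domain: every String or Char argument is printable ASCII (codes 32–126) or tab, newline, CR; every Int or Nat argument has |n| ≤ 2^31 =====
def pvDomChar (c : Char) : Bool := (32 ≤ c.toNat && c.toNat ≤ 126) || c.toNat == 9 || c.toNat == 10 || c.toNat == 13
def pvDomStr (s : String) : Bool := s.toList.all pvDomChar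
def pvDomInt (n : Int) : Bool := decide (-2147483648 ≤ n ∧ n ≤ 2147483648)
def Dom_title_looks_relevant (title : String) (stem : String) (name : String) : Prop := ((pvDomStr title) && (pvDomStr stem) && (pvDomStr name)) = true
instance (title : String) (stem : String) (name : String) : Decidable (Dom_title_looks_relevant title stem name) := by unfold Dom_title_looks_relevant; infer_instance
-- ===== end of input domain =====

-- B replaces the two term-by-term substring scans by ONE left-to-right pass over the
-- title that tests, at every position, whether any search term starts there (objective:
-- alternative traversal, same cost class).

-- ===== PORT A =====
def pvKeywords : List String :=
  ["futures", "price", "prices", "commodity", "commodities",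
   "rally", "falls", "surges", "barrel", "ounce", "bushel",
   "NYMEX", "COMEX", "ICE", "CBOT", "LME", "WTI", "Brent",
   "crude", "oil", "gas", "gold", "silver", "copper", "wheat",
   "corn", "soy", "sugar", "coffee", "cocoa", "natural gas",
   "Henry Hub", "TTF", "RBOB", "gasoline", "heating oil"]

-- `not title` = empty string; the two early-return for-loops are List.any in order.
def title_looks_relevant (title : String) (stem : String) (name : String) : Bool :=
  if title.toList.isEmpty then false
  else
    let lower := PySem.Chars.lower title.toList
    if pvKeywords.any (fun kw => PySem.Chars.isIn (PySem.Chars.lower kw.toList) lower) then true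
    else (PySem.Chars.split₀ (PySem.Chars.lower name.toList)).any
           (fun w => decide (3 ≤ w.length) && PySem.Chars.isIn w lower)

-- ===== PORT B =====
-- Source B: one term list, then any over positions j of lower; `lower.startswith(t, j)`
-- with j from range(len(lower)) (so 0 ≤ j) is `startswith (lower.drop j.toNat) t`.
def title_looks_relevant_alt (title : String) (stem : String) (name : String) : Bool :=
  if title.toList.isEmpty then false
  else
    let lower := PySem.Chars.lower title.toList
    let terms := pvKeywords.map (fun kw => PySem.Chars.lower kw.toList)
      ++ (PySem.Chars.split₀ (PySem.Chars.lower name.toList)).filter (fun w => decide (3 ≤ w.length))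
    (PySem.List.pyRange 0 (lower.length : Int) 1).any (fun j =>
      terms.any (fun t => PySem.Chars.startswith (lower.drop j.toNat) t))

-- ===== PRECONDITION & SPEC =====
def Spec_title_looks_relevant (title : String) (stem : String) (name : String) (out : Bool) : Prop := out = title_looks_relevant_alt title stem name
instance (title : String) (stem : String) (name : String) (out : Bool) : Decidable (Spec_title_looks_relevant title stem name out) := by unfold Spec_title_looks_relevant; infer_instance

-- ===== CLAIM (what is proved, stated in full; the proofs are below) =====
def Claim_equal_title_looks_relevant : Prop := ∀ (title : String) (stem : String) (name : String), Dom_title_looks_relevant title stem name → Spec_title_looks_relevant title stem name (title_looks_relevant title stem name)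

-- ===== LEMMAS AND PROOFS =====

-- the positional scan finds a nonempty term exactly when it is a substring
theorem pv_scan_eq_isIn (s t : List Char) (ht : t ≠ []) :
    ((PySem.List.pyRange 0 (s.length : Int) 1).any
      (fun j => PySem.Chars.startswith (s.drop j.toNat) t)) = PySem.Chars.isIn t s := by
  rw [Bool.eq_iff_iff]
  simp only [List.any_eq_true, PySem.List.mem_pyRange_one, PySem.Chars.startswith_iff]
  constructor
  · rintro ⟨j, ⟨h0, hj⟩, hp⟩
    exact (PySem.Chars.exists_prefix_drop_iff_isIn t s).mp ⟨j.toNat, hp⟩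
  · intro h
    obtain ⟨j, hp⟩ := (PySem.Chars.exists_prefix_drop_iff_isIn t s).mpr h
    have hjlt : j < s.length := by
      by_contra hge
      have : s.drop j = [] := List.drop_eq_nil_of_le (by omega)
      rw [this] at hp
      exact ht (List.prefix_nil.mp hp)
    refine ⟨(j : Int), ⟨by positivity, by exact_mod_cast hjlt⟩, ?_⟩
    simpa using hp

theorem pv_any_swap {α β : Type} (L : List α) (T : List β) (f : α → β → Bool) :
    (L.any fun j => T.any (f j)) = (T.any fun t => L.any (fun j => f j t)) := by
  rw [Bool.eq_iff_iff]
  simp only [List.any_eq_true]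
  tauto

-- ===== VERDICT (by name: the statement is the Claim_ definition above) =====
theorem title_looks_relevant_spec : Claim_equal_title_looks_relevant := by
  intro title stem name _
  unfold Spec_title_looks_relevant title_looks_relevant title_looks_relevant_alt
  by_cases h : title.toList.isEmpty
  · simp [h]
  · simp only [h, Bool.false_eq_true, if_false]
    set lower := PySem.Chars.lower title.toList with hl
    set words := PySem.Chars.split₀ (PySem.Chars.lower name.toList) with hw
    set terms := pvKeywords.map (fun kw => PySem.Chars.lower kw.toList)
      ++ words.filter (fun w => decide (3 ≤ w.length)) with hterms
    have hne : ∀ t ∈ terms, t ≠ [] := by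
      intro t hmem
      rcases List.mem_append.mp hmem with hk | hf
      · obtain ⟨kw, hkw, rfl⟩ := List.mem_map.mp hk
        revert hkw
        have : ∀ kw ∈ pvKeywords, PySem.Chars.lower kw.toList ≠ [] := by decide
        exact this kw
      · have := (List.mem_filter.mp hf).2
        have h3 : 3 ≤ t.length := by simpa using this
        intro hnil; simp [hnil] at h3
    have hrhs : ((PySem.List.pyRange 0 (lower.length : Int) 1).any (fun j =>
        terms.any (fun t => PySem.Chars.startswith (lower.drop j.toNat) t)))
        = terms.any (fun t => PySem.Chars.isIn t lower) := by
      rw [pv_any_swap]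
      exact PySem.List.any_congr_mem (fun t ht => pv_scan_eq_isIn lower t (hne t ht))
    rw [hrhs, hterms, List.any_append, List.any_map, List.any_filter]
    by_cases hK : pvKeywords.any (fun kw => PySem.Chars.isIn (PySem.Chars.lower kw.toList) lower)
    · simp [hK, Function.comp_def]
    · have hK' : (pvKeywords.any fun kw => PySem.Chars.isIn (PySem.Chars.lower kw.toList) lower) = false := by
        simpa using hK
      simp [hK', Function.comp_def]
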